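-- pv_equiv track=rewrite | github.com/ChrisZhuangDev/nsk_protocol | slave/NSK_Slave.py | sanitize_hex_input
-- ===== SOURCE A (Python) =====
-- def sanitize_hex_input(s: str, max_len: int | None) -> str:
-- 	if s is None:
-- 		s = ""
-- 	hex_chars = "0123456789abcdefABCDEF"
-- 	filtered = "".join(ch for ch in s if ch in hex_chars)
-- 	filtered = filtered.upper()
-- 	usable_len = len(filtered) - (len(filtered) % 2)
-- 	if usable_len < 0:
-- 		usable_len = 0
-- 	filtered = filtered[:usable_len]
-- 	pairs = [filtered[i:i+2] for i in range(0, len(filtered), 2)]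
-- 	if isinstance(max_len, int) and max_len > 0:
-- 		pairs = pairs[:max_len]
-- 	return " ".join(pairs)
-- ===== SOURCE B (Python) =====
-- def sanitize_hex_input(s: str, max_len) -> str:
--     # single pass: collect hex chars into a 2-char pending buffer, emit pairs,
--     # stop as soon as the pair cap is reached
--     hex_chars = "0123456789abcdefABCDEF"
--     limit = max_len if isinstance(max_len, int) and max_len > 0 else None
--     pairs = []
--     pending = ""
--     for ch in (s if s is not None else ""):
--         if ch not in hex_chars:
--             continue
--         pending += ch.upper()
--         if len(pending) == 2:
--             pairs.append(pending)
--             pending = ""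
--             if len(pairs) == limit:
--                 break
--     return " ".join(pairs)
-- ===== Notes on version B (the rewrite author's own statement) =====
-- stated objective: alternative
-- what changed: Replaced A's five sequential whole-string passes (filter-join, upper, even-length truncation, range/slice pairing, slice cap) by one linear scan that uppercases hex chars into a 2-char pending buffer, emits completed pairs, and breaks early once the pair cap is reached.
import Mathlib
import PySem

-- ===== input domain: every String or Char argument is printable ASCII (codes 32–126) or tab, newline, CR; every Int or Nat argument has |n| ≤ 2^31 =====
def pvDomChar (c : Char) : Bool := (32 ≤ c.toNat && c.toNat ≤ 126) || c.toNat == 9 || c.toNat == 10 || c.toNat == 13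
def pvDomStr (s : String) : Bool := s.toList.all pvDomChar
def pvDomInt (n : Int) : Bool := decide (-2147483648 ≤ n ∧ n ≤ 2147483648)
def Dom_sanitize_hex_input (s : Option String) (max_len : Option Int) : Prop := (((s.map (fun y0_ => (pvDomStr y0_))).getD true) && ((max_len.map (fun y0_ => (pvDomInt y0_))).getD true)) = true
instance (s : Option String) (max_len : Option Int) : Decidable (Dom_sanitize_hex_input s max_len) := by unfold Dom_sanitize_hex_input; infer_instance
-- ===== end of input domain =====

-- B replaces A's five sequential whole-string passes by one linear scan with a
-- two-char pending buffer and an early break at the pair cap (alternative, same cost).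


-- ===== PORT A =====
def sanitize_hex_input (s : Option String) (max_len : Option Int) : String :=
  let s0 : String := match s with | none => "" | some t => t
  let hex_chars : List Char := "0123456789abcdefABCDEF".toList
  let filtered : List Char := s0.toList.filter (fun ch => hex_chars.contains ch)
  let filtered2 : List Char := PySem.Chars.upper filtered
  let usable_len : Int := (filtered2.length : Int) - PySem.Int.mod (filtered2.length : Int) 2
  let usable_len2 : Int := if usable_len < 0 then 0 else usable_len
  let filtered3 : List Char := PySem.List.slice filtered2 none (some usable_len2)
  let pairs : List (List Char) :=
    (PySem.List.pyRange 0 (filtered3.length : Int) 2).map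
      (fun i => PySem.List.slice filtered3 (some i) (some (i + 2)))
  let pairs2 : List (List Char) :=
    match max_len with
    | some m => if 0 < m then PySem.List.slice pairs none (some m) else pairs
    | none => pairs
  String.ofList (PySem.Chars.join [' '] pairs2)

-- ===== PORT B =====
def pvHexChars : List Char := "0123456789abcdefABCDEF".toList

-- the single scan: pending buffer (at most one char), completed pairs, early stop at the cap
def pvPairLoop (limit : Option Int) : List Char → Option Char → List (List Char) → List (List Char)
  | [], _, pairs => pairs
  | ch :: rest, pending, pairs =>
    if pvHexChars.contains ch then
      let u := PySem.Chars.upperChar ch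
      match pending with
      | none => pvPairLoop limit rest (some u) pairs
      | some p =>
        let pairs' := pairs ++ [[p, u]]
        if some ((pairs'.length : Int)) == limit then pairs'
        else pvPairLoop limit rest none pairs'
    else pvPairLoop limit rest pending pairs

def sanitize_hex_input_alt (s : Option String) (max_len : Option Int) : String :=
  let limit : Option Int :=
    match max_len with
    | some m => if 0 < m then some m else none
    | none => none
  String.ofList (PySem.Chars.join [' '] (pvPairLoop limit ((s.getD "").toList) none []))

-- ===== PRECONDITION & SPEC =====
def Spec_sanitize_hex_input (s : Option String) (max_len : Option Int) (out : String) : Prop := out = sanitize_hex_input_alt s max_len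
instance (s : Option String) (max_len : Option Int) (out : String) : Decidable (Spec_sanitize_hex_input s max_len out) := by unfold Spec_sanitize_hex_input; infer_instance

-- ===== CLAIM (what is proved, stated in full; the proofs are below) =====
def Claim_equal_sanitize_hex_input : Prop := ∀ (s : Option String) (max_len : Option Int), Dom_sanitize_hex_input s max_len → Spec_sanitize_hex_input s max_len (sanitize_hex_input s max_len)

-- ===== LEMMAS AND PROOFS =====

-- chunk a list of chars into its complete pairs (trailing odd char dropped)
def pvChunk : List Char → List (List Char)
  | a :: b :: t => [a, b] :: pvChunk t
  | _ => []

-- chunking ignores truncation to even length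
theorem pvChunk_take_even : ∀ l : List Char, pvChunk (l.take (l.length - l.length % 2)) = pvChunk l := by
  intro l
  induction l using pvChunk.induct with
  | case1 a b t ih =>
    simp only [List.length_cons]
    have h : t.length + 1 + 1 - (t.length + 1 + 1) % 2 = (t.length - t.length % 2) + 2 := by omega
    rw [h]
    simp [List.take_succ_cons, pvChunk, ih]
  | case2 l h =>
    cases l with
    | nil => simp [pvChunk]
    | cons a t =>
      cases t with
      | nil => simp [pvChunk]
      | cons b t' => exact absurd rfl (h a b t')

-- A's range/slice pairing is pvChunk, on an even-length list
theorem pvSliceMap : ∀ (c : Nat) (l : List Char), l.length = 2 * c →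
    (List.range c).map (fun k => (l.drop (2 * k)).take 2) = pvChunk l := by
  intro c
  induction c with
  | zero =>
    intro l hl
    match l, hl with
    | [], _ => simp [pvChunk]
  | succ c ih =>
    intro l hl
    match l, hl with
    | a :: b :: t, hl =>
      have ht : t.length = 2 * c := by simp at hl; omega
      rw [List.range_succ_eq_map]
      simp only [List.map_cons, List.map_map]
      rw [pvChunk]
      have hhead : List.take 2 (List.drop (2 * 0) (a :: b :: t)) = [a, b] := by simp
      rw [hhead]
      congr 1
      rw [← ih t ht]
      apply List.map_congr_left
      intro k _
      simp only [Function.comp_apply]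
      have hd : (a :: b :: t).drop (2 * (k + 1)) = t.drop (2 * k) := by
        have h21 : 2 * (k + 1) = 2 * k + 1 + 1 := by omega
        rw [h21, List.drop_succ_cons, List.drop_succ_cons]
      rw [Nat.succ_eq_add_one, hd]

theorem pvRange_two (c : Nat) :
    PySem.List.pyRange 0 ((2 * c : Nat) : Int) 2 = (List.range c).map (fun k => ((2 * k : Nat) : Int)) := by
  rw [PySem.List.pyRange_of_pos 0 ((2 * c : Nat) : Int) (by norm_num)]
  have hcount : (if (0:Int) < ((2 * c : Nat) : Int) then ((((2 * c : Nat) : Int) - 0 + 2 - 1) / 2).toNat else 0) = c := by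
    split <;> omega
  rw [hcount]
  apply List.map_congr_left
  intro k _
  push_cast
  ring

-- B's loop, on an already-filtered, already-uppercased list
def pvLoop2 (limit : Option Int) : List Char → Option Char → List (List Char) → List (List Char)
  | [], _, pairs => pairs
  | u :: rest, pending, pairs =>
    match pending with
    | none => pvLoop2 limit rest (some u) pairs
    | some p =>
      let pairs' := pairs ++ [[p, u]]
      if some ((pairs'.length : Int)) == limit then pairs'
      else pvLoop2 limit rest none pairs'

theorem pvPairLoop_filter (limit : Option Int) : ∀ (cs : List Char) (pending : Option Char) (pairs : List (List Char)),
    pvPairLoop limit cs pending pairs =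
      pvLoop2 limit ((cs.filter (fun ch => pvHexChars.contains ch)).map PySem.Chars.upperChar) pending pairs := by
  intro cs
  induction cs with
  | nil => intro p q; simp [pvPairLoop, pvLoop2]
  | cons ch rest ih =>
    intro pending pairs
    by_cases h : ch ∈ pvHexChars
    · have hb : pvHexChars.contains ch = true := by simpa using h
      cases pending with
      | none => simp [pvPairLoop, h, pvLoop2, ih]
      | some p =>
        simp only [pvPairLoop, hb, List.filter_cons, if_pos, List.map_cons, pvLoop2]
        split <;> simp [ih]
    · simp [pvPairLoop, h, ih]

theorem pvLoop2_none : ∀ (l : List Char) (pending : Option Char) (pairs : List (List Char)),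
    pvLoop2 none l pending pairs = pairs ++ pvChunk (pending.toList ++ l) := by
  intro l
  induction l with
  | nil => intro pending pairs; cases pending <;> simp [pvLoop2, pvChunk]
  | cons u rest ih =>
    intro pending pairs
    cases pending with
    | none => simpa [pvLoop2] using ih (some u) pairs
    | some p => simp [pvLoop2, ih, pvChunk]

theorem pvLoop2_some (m : Int) (hm : 0 < m) : ∀ (l : List Char) (pending : Option Char) (pairs : List (List Char)),
    pairs.length < m.toNat →
    pvLoop2 (some m) l pending pairs = pairs ++ (pvChunk (pending.toList ++ l)).take (m.toNat - pairs.length) := by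
  intro l
  induction l with
  | nil => intro pending pairs _; cases pending <;> simp [pvLoop2, pvChunk]
  | cons u rest ih =>
    intro pending pairs hlt
    cases pending with
    | none => simpa [pvLoop2] using ih (some u) pairs hlt
    | some p =>
      simp only [pvLoop2, Option.toList, List.cons_append, List.nil_append, pvChunk]
      by_cases heq : ((pairs.length : Int) + 1 = m)
      · have h2 : m.toNat - pairs.length = 1 := by omega
        split
        · simp [h2]
        · simp_all
      · have h1 : ¬ ((((pairs ++ [[p, u]]).length : Int)) = m) := by simp; omega
        have hlt' : (pairs ++ [[p, u]]).length < m.toNat := by simp; omega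
        have h3 : m.toNat - pairs.length = (m.toNat - (pairs ++ [[p, u]]).length) + 1 := by simp; omega
        simp only [beq_iff_eq, Option.some.injEq, h1, if_false]
        rw [ih none _ hlt']
        simp [h3, List.take_succ_cons]

theorem pvModTwo (n : Nat) : PySem.Int.mod (n : Int) 2 = ((n % 2 : Nat) : Int) := by
  simp only [PySem.Int.mod]
  rw [Int.fmod_eq_emod]
  simp

theorem pvUpper_eq (cs : List Char) :
    PySem.Chars.upper (cs.filter fun ch => ("0123456789abcdefABCDEF".toList).contains ch)
      = (cs.filter (fun ch => pvHexChars.contains ch)).map PySem.Chars.upperChar := rfl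

theorem pvA_pairs (L : List Char) :
    (PySem.List.pyRange 0 (((L.take (L.length - L.length % 2)).length : Nat) : Int) 2).map
      (fun i => PySem.List.slice (L.take (L.length - L.length % 2)) (some i) (some (i + 2)))
      = pvChunk L := by
  have hlen : (L.take (L.length - L.length % 2)).length = 2 * (L.length / 2) := by
    simp only [List.length_take]
    omega
  rw [hlen, pvRange_two, List.map_map]
  have hsm := pvSliceMap (L.length / 2) (L.take (L.length - L.length % 2)) hlen
  rw [← pvChunk_take_even L, ← hsm]
  apply List.map_congr_left
  intro k _
  simp only [Function.comp_apply]
  have hc : (((2 * k : Nat) : Int)) + 2 = (((2 * k + 2 : Nat) : Int)) := by push_cast; ring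
  rw [hc, PySem.List.slice_natCast]
  congr 1
  omega

-- ===== VERDICT (by name: the statement is the Claim_ definition above) =====
theorem sanitize_hex_input_spec : Claim_equal_sanitize_hex_input := by
  unfold Claim_equal_sanitize_hex_input
  intro s max_len _
  unfold Spec_sanitize_hex_input sanitize_hex_input sanitize_hex_input_alt
  -- the two ports read the same source characters; then reduce both to pvChunk
  cases s <;> dsimp only [Option.getD]
  all_goals
    rw [pvPairLoop_filter, pvUpper_eq, pvModTwo]
    set L : List Char :=
      ((_ : List Char).filter (fun ch => pvHexChars.contains ch)).map PySem.Chars.upperChar with hL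
    have husable : ¬ ((L.length : Int) - ((L.length % 2 : Nat) : Int) < 0) := by omega
    rw [if_neg husable]
    have hslice : PySem.List.slice L none (some ((L.length : Int) - ((L.length % 2 : Nat) : Int)))
        = L.take (L.length - L.length % 2) := by
      rw [PySem.List.slice_to _ (by omega)]
      have ht : ((L.length : Int) - ((L.length % 2 : Nat) : Int)).toNat = L.length - L.length % 2 := by
        omega
      rw [ht]
    rw [hslice, pvA_pairs]
    cases max_len with
    | none =>
      dsimp only
      rw [pvLoop2_none]
      simp
    | some m =>
      dsimp only
      by_cases hm : 0 < m
      · rw [if_pos hm, if_pos hm]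
        rw [pvLoop2_some m hm _ none [] (by simp; omega)]
        rw [PySem.List.slice_to _ (by omega)]
        simp
      · rw [if_neg hm, if_neg hm, pvLoop2_none]
        simp
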